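-- pv_equiv track=rewrite | github.com/Freddie20/50-Days-of-Python-A-Challenge-a-Day | Day5_My Discount.py | gender_count
-- ===== SOURCE A (Python) =====
-- def gender_count(arr: list):
--     lowercase_list = []
--     gendercount_list = []
--     for gender in arr:
--         lowercase_list.append(gender.lower())
--     for sex in lowercase_list:
--         if sex[0].startswith('m'):
--             gendercount_list.append((sex, lowercase_list.count(sex)))
--             break
--     for f_sex in lowercase_list:
--         if f_sex[0].startswith('f'):
--             gendercount_list.append((f_sex, lowercase_list.count(f_sex)))
--             break
--     return gendercount_list
-- ===== SOURCE B (Python) =====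
-- def gender_count(arr: list):
--     # Single backward pass: maintain suffix counts; the last update for each
--     # gender letter while scanning right-to-left is the leftmost match, and at
--     # that moment the suffix count of its string equals its total count (every
--     # occurrence of that string is itself a match, hence not earlier).
--     seen = {}
--     m = None
--     f = None
--     for g in reversed(arr):
--         s = g.lower()
--         seen[s] = seen.get(s, 0) + 1
--         if s.startswith('m'):
--             m = (s, seen[s])
--         elif s.startswith('f'):
--             f = (s, seen[s])
--     out = []
--     if m is not None:
--         out.append(m)
--     if f is not None:
--         out.append(f)
--     return out
-- ===== Notes on version B (the rewrite author's own statement) =====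
-- stated objective: alternative
-- what changed: A makes two forward break-loops over the lowercased list, each rescanning it with list.count and indexing sex[0] (IndexError on empty strings); B traverses the list once in REVERSE maintaining a running suffix-count dict, overwriting the m- and f-candidate on each match so the final candidates are the leftmost matches and their recorded suffix counts equal the total counts (every occurrence of a matching string is itself a match, so none lies before the leftmost one).
-- crash fix: A raises IndexError when an empty string occurs before the first m-string or before the first f-string in the lowercased list; B skips empty strings and returns the gender counts. — e.g. on gender_count(["", "Male", "female"]): A raises IndexError, B returns [("male", 1), ("female", 1)]
import Mathlib
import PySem

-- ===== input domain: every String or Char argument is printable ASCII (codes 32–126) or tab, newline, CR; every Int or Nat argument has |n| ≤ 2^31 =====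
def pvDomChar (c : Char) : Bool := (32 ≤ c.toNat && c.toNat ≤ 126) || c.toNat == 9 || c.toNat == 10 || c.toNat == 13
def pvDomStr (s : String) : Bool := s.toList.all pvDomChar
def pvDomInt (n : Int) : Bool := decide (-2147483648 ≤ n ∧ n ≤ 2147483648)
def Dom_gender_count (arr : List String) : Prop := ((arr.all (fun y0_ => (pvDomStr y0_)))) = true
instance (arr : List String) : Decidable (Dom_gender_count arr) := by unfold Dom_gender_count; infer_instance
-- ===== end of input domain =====

-- B replaces A's two forward break-loops with `.count` rescans by ONE reverse pass that keeps a
-- running suffix-count dict and overwrites the m-/f-candidate on every match (alternative algorithm).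

-- ===== PORT A =====
-- one break-loop of A: scan `rem`, on the first element whose first char is `letter`
-- append (sex, lowercase_list.count(sex)) and break; `sex[0]` raises IndexError on "" (→ `none`
-- branch, input excluded by Pre_); `sex[0].startswith('m')` on a 1-char string is `c == 'm'`.
def gcLoop (full : List String) (letter : Char) : List String → List (String × Int)
  | [] => []
  | sex :: rest =>
    match PySem.Str.pyGet? sex 0 with
    | none => []  -- Python raises IndexError here; such inputs are outside Pre_
    | some c =>
      if c == letter then [(sex, (PySem.List.count full sex : Int))]
      else gcLoop full letter rest

def gender_count (arr : List String) : List (String × Int) :=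
  let lows := arr.foldl (fun acc g => acc ++ [PySem.Str.lower g]) []
  gcLoop lows 'm' lows ++ gcLoop lows 'f' lows

-- ===== PORT B =====
-- one step of B's backward loop: lowercase, bump the suffix count, and on a match overwrite the
-- candidate for that gender with (s, current suffix count of s)
def gcStep (st : PySem.Dict String Int × Option (String × Int) × Option (String × Int))
    (g : String) : PySem.Dict String Int × Option (String × Int) × Option (String × Int) :=
  let s := PySem.Str.lower g
  let c := st.1.getD s 0 + 1
  let d := st.1.insert s c
  if PySem.Str.startswith s "m" then (d, some (s, c), st.2.2)
  else if PySem.Str.startswith s "f" then (d, st.2.1, some (s, c))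
  else (d, st.2.1, st.2.2)

def gender_count_alt (arr : List String) : List (String × Int) :=
  let st := arr.reverse.foldl gcStep (PySem.Dict.empty, none, none)
  (match st.2.1 with | some p => [p] | none => []) ++
  (match st.2.2 with | some p => [p] | none => [])

-- ===== PRECONDITION & SPEC =====
-- Pre_ excludes exactly the inputs where A raises IndexError: a lowercased-empty string occurring
-- before the first 'm…' string, or one occurring before the first 'f…' string.
def Pre_gender_count (arr : List String) : Prop :=
  "" ∉ (arr.map PySem.Str.lower).takeWhile (fun s => !(PySem.Str.startswith s "m")) ∧
  "" ∉ (arr.map PySem.Str.lower).takeWhile (fun s => !(PySem.Str.startswith s "f"))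
instance (arr : List String) : Decidable (Pre_gender_count arr) := by
  unfold Pre_gender_count; infer_instance

def pvWitness_gender_count : List String := ["Male", "x", "Female", "male", ""]

-- A raises IndexError on these inputs (an empty string hit before the first m- or f-match); B
-- simply skips empty strings and returns the gender counts.
def Raises_gender_count (arr : List String) : Prop :=
  "" ∈ (arr.map PySem.Str.lower).takeWhile (fun s => !(PySem.Str.startswith s "m")) ∨
  "" ∈ (arr.map PySem.Str.lower).takeWhile (fun s => !(PySem.Str.startswith s "f"))
instance (arr : List String) : Decidable (Raises_gender_count arr) := by
  unfold Raises_gender_count; infer_instance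
def pvRaiseWitness_gender_count : List String := ["", "Male", "female"]
def pvRaiseWitnessOut_gender_count : List (String × Int) := [("male", 1), ("female", 1)]

def Spec_gender_count (arr : List String) (out : List (String × Int)) : Prop := out = gender_count_alt arr
instance (arr : List String) (out : List (String × Int)) : Decidable (Spec_gender_count arr out) := by unfold Spec_gender_count; infer_instance

-- ===== CLAIM (what is proved, stated in full; the proofs are below) =====
def Claim_equal_gender_count : Prop := ∀ (arr : List String), Dom_gender_count arr → Pre_gender_count arr → Spec_gender_count arr (gender_count arr)
def Claim_raises_gender_count : Prop := (∀ (arr : List String), Dom_gender_count arr → Raises_gender_count arr → ¬ Pre_gender_count arr) ∧ (Dom_gender_count (pvRaiseWitness_gender_count) ∧ Raises_gender_count (pvRaiseWitness_gender_count) ∧ gender_count_alt (pvRaiseWitness_gender_count) = pvRaiseWitnessOut_gender_count)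

-- ===== LEMMAS AND PROOFS =====

-- A's break-loop = find? + count, given no empty string before the first match
theorem gcLoop_eq_find (full : List String) (letter : Char) (rem : List String)
    (h : "" ∉ rem.takeWhile (fun s => !(PySem.Chars.startswith s.toList [letter]))) :
    gcLoop full letter rem =
      (rem.find? (fun s => PySem.Chars.startswith s.toList [letter])).elim []
        (fun s => [(s, (PySem.List.count full s : Int))]) := by
  induction rem with
  | nil => simp [gcLoop]
  | cons s rest ih =>
    rcases hs : s.toList with _ | ⟨d, tl⟩
    · exfalso
      have hse : s = "" := by simpa using congrArg String.ofList hs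
      apply h
      simp [hse, PySem.Chars.startswith]
    · have hget : PySem.List.pyGet? s.toList 0 = some d := by
        rw [PySem.List.pyGet?_zero, hs]; rfl
      have hsw : PySem.Chars.startswith s.toList [letter] = (d == letter) := by
        rw [hs]; simp [PySem.Chars.startswith, List.isPrefixOf, eq_comm]
      by_cases hd : d = letter
      · simp [gcLoop, hget, List.find?, hsw, hd]
      · have hbl : (d == letter) = false := beq_eq_false_iff_ne.mpr hd
        have h' : "" ∉ rest.takeWhile
            (fun s => !(PySem.Chars.startswith s.toList [letter])) := by
          intro hmem; apply h
          have hpred : (!PySem.Chars.startswith s.toList [letter]) = true := by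
            simp [hsw, hbl]
          simp only [List.takeWhile_cons, hpred, if_true]
          exact List.mem_cons_of_mem _ hmem
        simp [gcLoop, hget, List.find?, hsw, hbl, ih h']


-- a string cannot start with both "m" and "f"
theorem not_start_mf (s : String) (hm : PySem.Str.startswith s "m" = true) :
    PySem.Str.startswith s "f" = false := by
  rcases hs : s.toList with _ | ⟨c, tl⟩ <;>
    simp_all [PySem.Str.startswith, PySem.Chars.startswith, List.isPrefixOf]
  intro h
  rw [← hm] at h
  exact absurd h (by decide)

-- the three shapes of one step of B's backward loop
theorem gcStep_m (st : PySem.Dict String Int × Option (String × Int) × Option (String × Int))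
    (g : String) (hm : PySem.Str.startswith (PySem.Str.lower g) "m" = true) :
    gcStep st g = (st.1.insert (PySem.Str.lower g) (st.1.getD (PySem.Str.lower g) 0 + 1),
      some (PySem.Str.lower g, st.1.getD (PySem.Str.lower g) 0 + 1), st.2.2) := by
  simp only [gcStep, hm, if_true]

theorem gcStep_f (st : PySem.Dict String Int × Option (String × Int) × Option (String × Int))
    (g : String) (hm : PySem.Str.startswith (PySem.Str.lower g) "m" = false)
    (hf : PySem.Str.startswith (PySem.Str.lower g) "f" = true) :
    gcStep st g = (st.1.insert (PySem.Str.lower g) (st.1.getD (PySem.Str.lower g) 0 + 1),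
      st.2.1, some (PySem.Str.lower g, st.1.getD (PySem.Str.lower g) 0 + 1)) := by
  simp only [gcStep, hm, hf, Bool.false_eq_true, if_false, if_true]

theorem gcStep_skip (st : PySem.Dict String Int × Option (String × Int) × Option (String × Int))
    (g : String) (hm : PySem.Str.startswith (PySem.Str.lower g) "m" = false)
    (hf : PySem.Str.startswith (PySem.Str.lower g) "f" = false) :
    gcStep st g = (st.1.insert (PySem.Str.lower g) (st.1.getD (PySem.Str.lower g) 0 + 1),
      st.2.1, st.2.2) := by
  simp only [gcStep, hm, hf, Bool.false_eq_true, if_false]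

-- skipping a non-matching head changes neither the first match nor its count
theorem find_map_skip (s : String) (L : List String) (p : String → Bool) (hp : p s = false) :
    (L.find? p).map (fun t => (t, (PySem.List.count L t : Int)))
      = (L.find? p).map (fun t => (t, (PySem.List.count (s :: L) t : Int))) := by
  rcases hft : L.find? p with _ | t
  · rfl
  · have hpt := List.find?_some hft
    have hne : ¬ t = s := by
      intro h; rw [h, hp] at hpt; exact Bool.false_ne_true hpt
    have hne' : ¬ s = t := fun h => hne h.symm
    simp [PySem.List.count_eq, List.count_cons, hne']

-- invariant of B's backward fold: the dict holds the counts of the processed part, and each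
-- candidate is the leftmost match of the processed part paired with its count there
theorem gcInv (l : List String) :
    (∀ v, (l.reverse.foldl gcStep (PySem.Dict.empty, none, none)).1.getD v 0
        = (PySem.List.count (l.map PySem.Str.lower) v : Int)) ∧
    (l.reverse.foldl gcStep (PySem.Dict.empty, none, none)).2.1
      = ((l.map PySem.Str.lower).find? (fun s => PySem.Str.startswith s "m")).map
          (fun s => (s, (PySem.List.count (l.map PySem.Str.lower) s : Int))) ∧
    (l.reverse.foldl gcStep (PySem.Dict.empty, none, none)).2.2
      = ((l.map PySem.Str.lower).find? (fun s => PySem.Str.startswith s "f")).map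
          (fun s => (s, (PySem.List.count (l.map PySem.Str.lower) s : Int))) := by
  induction l with
  | nil =>
    refine ⟨fun v => ?_, rfl, rfl⟩
    simp [PySem.List.count_eq, PySem.Dict.getD_empty]
  | cons x rest ih =>
    obtain ⟨ihd, ihm, ihf⟩ := ih
    rw [List.reverse_cons, List.foldl_append]
    simp only [List.foldl_cons, List.foldl_nil]
    have hmap : (x :: rest).map PySem.Str.lower
        = PySem.Str.lower x :: rest.map PySem.Str.lower := rfl
    rw [hmap]
    have hcnt : ∀ v : String,
        (PySem.List.count (PySem.Str.lower x :: rest.map PySem.Str.lower) v : Int)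
          = (PySem.List.count (rest.map PySem.Str.lower) v : Int)
              + (if v = PySem.Str.lower x then 1 else 0) := by
      intro v
      by_cases hv : v = PySem.Str.lower x
      · simp [PySem.List.count_eq, hv]
      · have hv' : ¬ PySem.Str.lower x = v := fun h => hv h.symm
        simp [PySem.List.count_eq, hv, hv']
    have hdict : ∀ v,
        (((rest.reverse.foldl gcStep (PySem.Dict.empty, none, none)).1.insert
            (PySem.Str.lower x)
            ((rest.reverse.foldl gcStep (PySem.Dict.empty, none, none)).1.getD
              (PySem.Str.lower x) 0 + 1)).getD v 0)
          = (PySem.List.count (PySem.Str.lower x :: rest.map PySem.Str.lower) v : Int) := by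
      intro v
      rw [PySem.Dict.getD_insert, hcnt]
      by_cases hv : v = PySem.Str.lower x
      · rw [if_pos hv, if_pos hv, ihd, hv]
      · rw [if_neg hv, if_neg hv, ihd, add_zero]
    by_cases hm : PySem.Str.startswith (PySem.Str.lower x) "m" = true
    · have hf := not_start_mf _ hm
      rw [gcStep_m _ _ hm]
      refine ⟨hdict, ?_, ?_⟩
      · rw [List.find?_cons_of_pos (p := fun s => PySem.Str.startswith s "m") hm]
        show some (PySem.Str.lower x,
            (rest.reverse.foldl gcStep (PySem.Dict.empty, none, none)).1.getD
              (PySem.Str.lower x) 0 + 1)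
          = some (PySem.Str.lower x,
            (PySem.List.count (PySem.Str.lower x :: rest.map PySem.Str.lower)
              (PySem.Str.lower x) : Int))
        rw [hcnt, if_pos rfl, ihd]
      · rw [List.find?_cons_of_neg (p := fun s => PySem.Str.startswith s "f") (by simpa [PySem.Str.startswith, PySem.Str.lower] using hf),
          ← find_map_skip (PySem.Str.lower x) (rest.map PySem.Str.lower) (fun s => PySem.Str.startswith s "f") hf]
        exact ihf
    · have hm' : PySem.Str.startswith (PySem.Str.lower x) "m" = false :=
        eq_false_of_ne_true hm
      by_cases hf : PySem.Str.startswith (PySem.Str.lower x) "f" = true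
      · rw [gcStep_f _ _ hm' hf]
        refine ⟨hdict, ?_, ?_⟩
        · rw [List.find?_cons_of_neg (p := fun s => PySem.Str.startswith s "m") (by simpa [PySem.Str.startswith, PySem.Str.lower] using hm'),
            ← find_map_skip (PySem.Str.lower x) (rest.map PySem.Str.lower) (fun s => PySem.Str.startswith s "m") hm']
          exact ihm
        · rw [List.find?_cons_of_pos (p := fun s => PySem.Str.startswith s "f") hf]
          show some (PySem.Str.lower x,
              (rest.reverse.foldl gcStep (PySem.Dict.empty, none, none)).1.getD
                (PySem.Str.lower x) 0 + 1)
            = some (PySem.Str.lower x,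
              (PySem.List.count (PySem.Str.lower x :: rest.map PySem.Str.lower)
                (PySem.Str.lower x) : Int))
          rw [hcnt, if_pos rfl, ihd]
      · have hf' : PySem.Str.startswith (PySem.Str.lower x) "f" = false :=
          eq_false_of_ne_true hf
        rw [gcStep_skip _ _ hm' hf']
        refine ⟨hdict, ?_, ?_⟩
        · rw [List.find?_cons_of_neg (p := fun s => PySem.Str.startswith s "m") (by simpa [PySem.Str.startswith, PySem.Str.lower] using hm'),
            ← find_map_skip (PySem.Str.lower x) (rest.map PySem.Str.lower) (fun s => PySem.Str.startswith s "m") hm']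
          exact ihm
        · rw [List.find?_cons_of_neg (p := fun s => PySem.Str.startswith s "f") (by simpa [PySem.Str.startswith, PySem.Str.lower] using hf'),
            ← find_map_skip (PySem.Str.lower x) (rest.map PySem.Str.lower) (fun s => PySem.Str.startswith s "f") hf']
          exact ihf

-- ===== VERDICT (by name: the statement is the Claim_ definition above) =====
theorem gender_count_spec : Claim_equal_gender_count := by
  intro arr _ hpre
  obtain ⟨hm, hf⟩ := hpre
  obtain ⟨-, hm2, hf2⟩ := gcInv arr
  show gender_count arr = gender_count_alt arr
  unfold gender_count gender_count_alt
  simp only [PySem.List.foldl_append_singleton_eq_map, List.nil_append]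
  rw [hm2, hf2]
  have heqm : (fun s => PySem.Str.startswith s "m")
      = (fun s => PySem.Chars.startswith s.toList ['m']) := by
    funext s; simp [PySem.Str.startswith]
  have heqf : (fun s => PySem.Str.startswith s "f")
      = (fun s => PySem.Chars.startswith s.toList ['f']) := by
    funext s; simp [PySem.Str.startswith]
  have hm' : "" ∉ (arr.map PySem.Str.lower).takeWhile
      (fun s => !(PySem.Chars.startswith s.toList ['m'])) := by simpa using hm
  have hf' : "" ∉ (arr.map PySem.Str.lower).takeWhile
      (fun s => !(PySem.Chars.startswith s.toList ['f'])) := by simpa using hf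
  rw [heqm, heqf]
  generalize arr.map PySem.Str.lower = l at hm' hf' ⊢
  rw [gcLoop_eq_find _ _ _ hm', gcLoop_eq_find _ _ _ hf']
  rcases hfm : l.find? (fun s => PySem.Chars.startswith s.toList ['m']) with _ | a <;>
    rcases hff : l.find? (fun s => PySem.Chars.startswith s.toList ['f']) with _ | b <;>
    simp [hfm, hff]

def gender_count_raises : Claim_raises_gender_count := by
  unfold Claim_raises_gender_count
  refine ⟨fun arr _ hr hp => ?_, by decide⟩
  rcases hr with h | h
  · exact hp.1 h
  · exact hp.2 h
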